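-- pv_equiv track=rewrite | github.com/WhoIsJayD/python-beginner-projects | projects/Password Projects/Password Meter/meter_pass.py | sequentialNumbers
-- ===== SOURCE A (Python) =====
-- sequenceNumbers = "0123456789"
--
-- def sequentialNumbers(password):
--     numbers = ""
--     countNumbers = 0
--
--     for i in range(len(password)):
--         numbers += password[i : i + 3]
--
--         if numbers in sequenceNumbers and len(numbers) == 3:
--             countNumbers += 1
--
--         numbers = ""
--
--     return (countNumbers * 3) * -1
-- ===== SOURCE B (Python) =====
-- def sequentialNumbers(password):
--     triples = ("012", "123", "234", "345", "456", "567", "678", "789")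
--     return -3 * sum(password.count(t) for t in triples)
-- ===== Notes on version B (the rewrite author's own statement) =====
-- stated objective: faster
-- what changed: A makes one per-index pass slicing a 3-char window and testing it as a substring of the ten-digit sequence string; B instead enumerates the eight fixed ascending digit triples and sums str.count over the whole password for each (staged pattern scans, no per-index slicing) -- correct because each triple has distinct characters, so non-overlapping count equals the number of matching window positions, and at most one triple matches any position.
import Mathlib
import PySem

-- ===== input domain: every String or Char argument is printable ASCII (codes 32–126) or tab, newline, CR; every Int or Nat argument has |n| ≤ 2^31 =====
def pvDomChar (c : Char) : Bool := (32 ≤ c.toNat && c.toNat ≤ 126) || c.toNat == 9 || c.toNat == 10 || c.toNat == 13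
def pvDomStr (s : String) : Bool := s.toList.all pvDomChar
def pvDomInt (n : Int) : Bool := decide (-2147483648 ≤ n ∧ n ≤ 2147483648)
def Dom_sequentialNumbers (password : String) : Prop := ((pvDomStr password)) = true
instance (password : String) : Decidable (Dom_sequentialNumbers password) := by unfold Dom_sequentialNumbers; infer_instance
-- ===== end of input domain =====

-- B replaces A's per-index window-slicing pass by summing str.count of the eight fixed
-- ascending digit triples over the whole password (objective: simpler).

-- ===== PORT A =====
-- module constant `sequenceNumbers = "0123456789"`
def sequenceNumbersConst : List Char := "0123456789".toList

-- literal transliteration of A: for i in range(len(password)): numbers += password[i:i+3];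
-- if numbers in sequenceNumbers and len(numbers) == 3: countNumbers += 1; numbers = ""
def sequentialNumbers (password : String) : Int :=
  let p := password.toList
  let st := (PySem.List.pyRange 0 (PySem.Chars.len p) 1).foldl
    (fun (st : List Char × Int) i =>
      let numbers := st.1 ++ PySem.Chars.slice p (some i) (some (i + 3))
      let countNumbers :=
        if PySem.Chars.isIn numbers sequenceNumbersConst = true ∧ PySem.Chars.len numbers = 3
        then st.2 + 1 else st.2
      (([] : List Char), countNumbers))
    (([] : List Char), 0)
  st.2 * 3 * (-1)

-- ===== PORT B =====
-- Source B's tuple of the eight ascending digit triples ("012", …, "789"), as character lists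
def pvTriples : List (List Char) :=
  [['0','1','2'], ['1','2','3'], ['2','3','4'], ['3','4','5'],
   ['4','5','6'], ['5','6','7'], ['6','7','8'], ['7','8','9']]

-- literal transliteration of Source B: -3 * sum(password.count(t) for t in triples)
def sequentialNumbers_alt (password : String) : Int :=
  let total : Int :=
    pvTriples.foldl (fun (acc : Int) t => acc + (PySem.Chars.count password.toList t : Int)) 0;
  -3 * total

-- ===== PRECONDITION & SPEC =====
def Spec_sequentialNumbers (password : String) (out : Int) : Prop := out = sequentialNumbers_alt password
instance (password : String) (out : Int) : Decidable (Spec_sequentialNumbers password out) := by unfold Spec_sequentialNumbers; infer_instance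

-- ===== CLAIM (what is proved, stated in full; the proofs are below) =====
def Claim_equal_sequentialNumbers : Prop := ∀ (password : String), Dom_sequentialNumbers password → Spec_sequentialNumbers password (sequentialNumbers password)

-- ===== LEMMAS AND PROOFS =====

-- A's window predicate at (natural-number) index k
def pvWinA (p : List Char) (k : Nat) : Bool :=
  decide (PySem.Chars.isIn (PySem.Chars.slice p (some (k : Int)) (some ((k : Int) + 3))) sequenceNumbersConst = true
    ∧ PySem.Chars.len (PySem.Chars.slice p (some (k : Int)) (some ((k : Int) + 3))) = 3)

-- number of positions of l at which t starts
def pvCnt (t l : List Char) : Nat :=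
  (List.range l.length).countP (fun i => t.isPrefixOf (l.drop i))

lemma char_le_iff (c d : Char) : c ≤ d ↔ c.toNat ≤ d.toNat := by
  simp [Char.le_def, UInt32.le_iff_toNat_le]

lemma char_eq_of_toNat (c : Char) (n : Nat) (h : c.toNat = n) : c = Char.ofNat n := by
  rw [← h, Char.ofNat_toNat]

lemma char_eq_iff (c d : Char) : c = d ↔ c.toNat = d.toNat := by
  constructor
  · intro h; rw [h]
  · intro h
    rw [char_eq_of_toNat c d.toNat h, Char.ofNat_toNat]

-- "xyz" is a (length-3) substring of "0123456789" iff x ∈ '0'..'7', y = x+1, z = x+2 (code points)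
lemma window_iff (x y z : Char) :
    PySem.Chars.isIn [x, y, z] sequenceNumbersConst = true
      ↔ ('0' ≤ x ∧ x ≤ '7' ∧ y.toNat = x.toNat + 1 ∧ z.toNat = x.toNat + 2) := by
  rw [← PySem.Chars.exists_prefix_drop_iff_isIn]
  constructor
  · rintro ⟨j, hj⟩
    have hlen : 3 ≤ (List.drop j sequenceNumbersConst).length := by
      simpa using hj.length_le
    have hj7 : j ≤ 7 := by
      simp [sequenceNumbersConst] at hlen; omega
    interval_cases j <;>
      (simp only [sequenceNumbersConst] at hj; simp [List.cons_prefix_cons] at hj;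
       obtain ⟨hx, hy, hz⟩ := hj; subst hx; subst hy; subst hz;
       refine ⟨by decide, by decide, by decide, by decide⟩)
  · rintro ⟨h0, h7, hy, hz⟩
    rw [char_le_iff] at h0 h7
    have hx : x.toNat = 48 ∨ x.toNat = 49 ∨ x.toNat = 50 ∨ x.toNat = 51 ∨ x.toNat = 52
        ∨ x.toNat = 53 ∨ x.toNat = 54 ∨ x.toNat = 55 := by
      have : ('0' : Char).toNat = 48 := by decide
      have : ('7' : Char).toNat = 55 := by decide
      omega
    rcases hx with h|h|h|h|h|h|h|h
    · exact ⟨0, by rw [char_eq_of_toNat x 48 h, char_eq_of_toNat y 49 (by omega), char_eq_of_toNat z 50 (by omega)]; decide⟩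
    · exact ⟨1, by rw [char_eq_of_toNat x 49 h, char_eq_of_toNat y 50 (by omega), char_eq_of_toNat z 51 (by omega)]; decide⟩
    · exact ⟨2, by rw [char_eq_of_toNat x 50 h, char_eq_of_toNat y 51 (by omega), char_eq_of_toNat z 52 (by omega)]; decide⟩
    · exact ⟨3, by rw [char_eq_of_toNat x 51 h, char_eq_of_toNat y 52 (by omega), char_eq_of_toNat z 53 (by omega)]; decide⟩
    · exact ⟨4, by rw [char_eq_of_toNat x 52 h, char_eq_of_toNat y 53 (by omega), char_eq_of_toNat z 54 (by omega)]; decide⟩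
    · exact ⟨5, by rw [char_eq_of_toNat x 53 h, char_eq_of_toNat y 54 (by omega), char_eq_of_toNat z 55 (by omega)]; decide⟩
    · exact ⟨6, by rw [char_eq_of_toNat x 54 h, char_eq_of_toNat y 55 (by omega), char_eq_of_toNat z 56 (by omega)]; decide⟩
    · exact ⟨7, by rw [char_eq_of_toNat x 55 h, char_eq_of_toNat y 56 (by omega), char_eq_of_toNat z 57 (by omega)]; decide⟩

-- A's fold with its reset pair-state counts the window positions
lemma foldA (p : List Char) (L : List Int) (c : Int) :
    (L.foldl
      (fun (st : List Char × Int) i =>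
        let numbers := st.1 ++ PySem.Chars.slice p (some i) (some (i + 3))
        (([] : List Char),
          if PySem.Chars.isIn numbers sequenceNumbersConst = true ∧ PySem.Chars.len numbers = 3
          then st.2 + 1 else st.2))
      (([] : List Char), c)).2
    = c + (L.countP (fun i =>
        decide (PySem.Chars.isIn (PySem.Chars.slice p (some i) (some (i + 3))) sequenceNumbersConst = true
          ∧ PySem.Chars.len (PySem.Chars.slice p (some i) (some (i + 3))) = 3)) : Int) := by
  induction L generalizing c with
  | nil => simp
  | cons i L ih => simp only [List.foldl_cons, List.countP_cons, ih]; split_ifs with h <;> simp_all <;> omega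

lemma slice3 (p : List Char) (k : Nat) :
    PySem.Chars.slice p (some (k : Int)) (some ((k : Int) + 3)) = List.take 3 (List.drop k p) := by
  have e := PySem.List.slice_natCast_add p k 3
  push_cast at e
  simp only [PySem.Chars.slice_eq_listSlice]
  exact_mod_cast e

lemma shiftA (x : Char) (t : List Char) (k : Nat) : pvWinA (x :: t) (k + 1) = pvWinA t k := by
  unfold pvWinA
  rw [slice3, slice3, List.drop_succ_cons]

lemma headShort1 (x : Char) : pvWinA [x] 0 = false := by
  unfold pvWinA; rw [slice3]; simp [PySem.Chars.len_eq]

lemma headShort2 (x y : Char) : pvWinA [x, y] 0 = false := by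
  unfold pvWinA; rw [slice3]; simp [PySem.Chars.len_eq]

lemma portA_eq (pw : String) :
    sequentialNumbers pw
      = ((List.range pw.toList.length).countP (pvWinA pw.toList) : Int) * 3 * (-1) := by
  simp only [sequentialNumbers]
  rw [foldA]
  have hr : PySem.List.pyRange 0 (PySem.Chars.len pw.toList) 1
      = (List.range pw.toList.length).map (fun k => ((k : Nat) : Int)) := by
    rw [PySem.List.pyRange_one]; simp [PySem.Chars.len_eq]
  rw [hr, List.countP_map]
  simp [Function.comp_def]
  exact List.countP_congr fun k _ => by simp [pvWinA, PySem.Chars.len_eq]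

-- occurrences of a distinct-character triple cannot overlap
lemma noOverlap (x y z : Char) (hxy : x ≠ y) (hxz : x ≠ z) (l : List Char)
    (h : [x, y, z] <+: l) : ¬ [x, y, z] <+: l.drop 1 ∧ ¬ [x, y, z] <+: l.drop 2 := by
  obtain ⟨r, rfl⟩ := h
  constructor
  · intro h1
    simp [List.cons_prefix_cons] at h1
    exact hxy h1.1
  · intro h2
    simp [List.cons_prefix_cons] at h2
    exact hxz h2.1

lemma cnt_shift (t : List Char) (h : Char) (tl : List Char) :
    pvCnt t (h :: tl) = (if t.isPrefixOf (h :: tl) then 1 else 0) + pvCnt t tl := by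
  unfold pvCnt
  rw [List.length_cons, List.range_succ_eq_map, List.countP_cons, List.countP_map]
  have : ((fun i => t.isPrefixOf (List.drop i (h :: tl))) ∘ Nat.succ)
      = (fun i => t.isPrefixOf (List.drop i tl)) := by
    funext i; simp [List.drop_succ_cons]
  rw [this]
  simp only [List.drop_zero]
  rw [Nat.add_comm]
  rfl

-- Python's non-overlapping str.count equals the positional count for a non-overlappable triple
lemma countGo (x y z : Char) (hxy : x ≠ y) (hxz : x ≠ z) :
    ∀ (fuel : Nat) (l : List Char) (acc : Nat), l.length ≤ fuel →
      PySem.Chars.count.go [x, y, z] fuel l acc = acc + pvCnt [x, y, z] l := by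
  intro fuel
  induction fuel with
  | zero =>
    intro l acc hl
    have : l = [] := List.eq_nil_of_length_eq_zero (Nat.le_zero.mp hl)
    subst this
    simp [PySem.Chars.count.go, pvCnt]
  | succ fuel ih =>
    intro l acc hl
    match l with
    | [] => simp [PySem.Chars.count.go, pvCnt]
    | h :: tl =>
      rw [PySem.Chars.count.go]
      by_cases hp : [x, y, z].isPrefixOf (h :: tl)
      · rw [if_pos hp]
        obtain ⟨r, hr⟩ := List.isPrefixOf_iff_prefix.mp hp
        have hr' : h :: tl = x :: y :: z :: r := by simpa using hr.symm
        have hno := noOverlap x y z hxy hxz (h :: tl) (List.isPrefixOf_iff_prefix.mp hp)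
        have hlen3 : (h :: tl).drop 3 = r := by rw [hr']; rfl
        have hlr : r.length ≤ fuel := by
          have := hl; rw [hr'] at this; simp at this; omega
        rw [show ([x, y, z] : List Char).length = 3 from rfl, hlen3, ih r (acc + 1) hlr]
        have e1 : pvCnt [x, y, z] (h :: tl) = 1 + pvCnt [x, y, z] r := by
          rw [hr', cnt_shift, cnt_shift, cnt_shift]
          rw [if_pos (by simpa [hr'] using hp)]
          rw [if_neg (by rw [List.isPrefixOf_iff_prefix]; have := hno.1; rw [hr'] at this; simpa using this)]
          rw [if_neg (by rw [List.isPrefixOf_iff_prefix]; have := hno.2; rw [hr'] at this; simpa using this)]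
          omega
        omega
      · rw [if_neg hp, ih tl acc (by simpa using Nat.le_of_succ_le_succ hl), cnt_shift, if_neg hp]
        omega

lemma count_eq_cnt (x y z : Char) (hxy : x ≠ y) (hxz : x ≠ z) (l : List Char) :
    PySem.Chars.count l [x, y, z] = pvCnt [x, y, z] l := by
  rw [PySem.Chars.count, if_neg (by simp)]
  simpa using countGo x y z hxy hxz l.length l 0 (le_refl _)

-- arithmetic form of the per-position indicator identity
lemma head8_arith (a b c : Nat) :
    ((if 48 = a ∧ 49 = b ∧ 50 = c then 1 else 0) + ((if 49 = a ∧ 50 = b ∧ 51 = c then 1 else 0)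
      + ((if 50 = a ∧ 51 = b ∧ 52 = c then 1 else 0) + ((if 51 = a ∧ 52 = b ∧ 53 = c then 1 else 0)
      + ((if 52 = a ∧ 53 = b ∧ 54 = c then 1 else 0) + ((if 53 = a ∧ 54 = b ∧ 55 = c then 1 else 0)
      + ((if 54 = a ∧ 55 = b ∧ 56 = c then 1 else 0) + (if 55 = a ∧ 56 = b ∧ 57 = c then 1 else 0)))))) : Nat))
    = if 48 ≤ a ∧ a ≤ 55 ∧ b = a + 1 ∧ c = a + 2 then 1 else 0 := by
  by_cases hW : 48 ≤ a ∧ a ≤ 55 ∧ b = a + 1 ∧ c = a + 2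
  · obtain ⟨h1, h2, h3, h4⟩ := hW
    have ha : a = 48 ∨ a = 49 ∨ a = 50 ∨ a = 51 ∨ a = 52 ∨ a = 53 ∨ a = 54 ∨ a = 55 := by omega
    subst h3; subst h4
    rcases ha with h|h|h|h|h|h|h|h <;> subst h <;> decide
  · rw [if_neg hW,
      if_neg (show ¬(48 = a ∧ 49 = b ∧ 50 = c) by omega),
      if_neg (show ¬(49 = a ∧ 50 = b ∧ 51 = c) by omega),
      if_neg (show ¬(50 = a ∧ 51 = b ∧ 52 = c) by omega),
      if_neg (show ¬(51 = a ∧ 52 = b ∧ 53 = c) by omega),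
      if_neg (show ¬(52 = a ∧ 53 = b ∧ 54 = c) by omega),
      if_neg (show ¬(53 = a ∧ 54 = b ∧ 55 = c) by omega),
      if_neg (show ¬(54 = a ∧ 55 = b ∧ 56 = c) by omega),
      if_neg (show ¬(55 = a ∧ 56 = b ∧ 57 = c) by omega)]

-- head indicator: sum of the eight triple-prefix indicators = A's window indicator
lemma head8 (l : List Char) :
    (pvTriples.map (fun t => if t.isPrefixOf l then (1 : Nat) else 0)).sum
      = if pvWinA l 0 = true then 1 else 0 := by
  have e0 : ('0' : Char).toNat = 48 := rfl
  have e1 : ('1' : Char).toNat = 49 := rfl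
  have e2 : ('2' : Char).toNat = 50 := rfl
  have e3 : ('3' : Char).toNat = 51 := rfl
  have e4 : ('4' : Char).toNat = 52 := rfl
  have e5 : ('5' : Char).toNat = 53 := rfl
  have e6 : ('6' : Char).toNat = 54 := rfl
  have e7 : ('7' : Char).toNat = 55 := rfl
  have e8 : ('8' : Char).toNat = 56 := rfl
  have e9 : ('9' : Char).toNat = 57 := rfl
  match l with
  | [] => simp [pvTriples, pvWinA, PySem.Chars.len_eq]
  | [x] => simp [pvTriples, headShort1]
  | [x, y] => simp [pvTriples, headShort2]
  | x :: y :: v :: w =>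
    have hw : (pvWinA (x :: y :: v :: w) 0 = true)
        ↔ (48 ≤ x.toNat ∧ x.toNat ≤ 55 ∧ y.toNat = x.toNat + 1 ∧ v.toNat = x.toNat + 2) := by
      unfold pvWinA
      rw [slice3]
      simp only [List.drop_zero, List.take_succ_cons, List.take_zero, decide_eq_true_eq]
      constructor
      · rintro ⟨hin, _⟩
        obtain ⟨h0, h7, hy, hz⟩ := (window_iff x y v).mp hin
        rw [char_le_iff] at h0 h7
        omega
      · rintro ⟨h0, h7, hy, hz⟩
        refine ⟨(window_iff x y v).mpr ⟨?_, ?_, hy, hz⟩, by simp [PySem.Chars.len_eq]⟩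
        · rw [char_le_iff]; omega
        · rw [char_le_iff]; omega
    simp only [pvTriples, List.map_cons, List.map_nil, List.sum_cons, List.sum_nil, Nat.add_zero]
    simp only [List.isPrefixOf, Bool.and_true, Bool.and_eq_true, beq_iff_eq]
    rw [if_congr hw rfl rfl]
    simp only [char_eq_iff, e0, e1, e2, e3, e4, e5, e6, e7, e8, e9]
    exact head8_arith x.toNat y.toNat v.toNat

-- the core count equality, structural on the character list
lemma core (p : List Char) :
    (pvTriples.map (fun t => pvCnt t p)).sum = (List.range p.length).countP (pvWinA p) := by
  induction p with
  | nil => simp [pvTriples, pvCnt]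
  | cons x t ih =>
    have hsplit : (List.range (x :: t).length).countP (pvWinA (x :: t))
        = ((List.range t.length).countP (pvWinA t) + if pvWinA (x :: t) 0 then 1 else 0) := by
      rw [List.length_cons, List.range_succ_eq_map, List.countP_cons, List.countP_map]
      have hs : (pvWinA (x :: t) ∘ Nat.succ) = pvWinA t := by
        funext k; exact shiftA x t k
      rw [hs]
    have hmap : (pvTriples.map (fun u => pvCnt u (x :: t))).sum
        = (pvTriples.map (fun u => if u.isPrefixOf (x :: t) then (1 : Nat) else 0)).sum
          + (pvTriples.map (fun u => pvCnt u t)).sum := by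
      simp only [pvTriples, List.map_cons, List.map_nil, List.sum_cons, List.sum_nil]
      rw [cnt_shift, cnt_shift, cnt_shift, cnt_shift, cnt_shift, cnt_shift, cnt_shift, cnt_shift]
      ring
    rw [hmap, head8, ih, hsplit]
    exact Nat.add_comm _ _

lemma portB_eq (pw : String) :
    sequentialNumbers_alt pw
      = -3 * (((List.range pw.toList.length).countP (pvWinA pw.toList) : Nat) : Int) := by
  simp only [sequentialNumbers_alt]
  rw [← core pw.toList]
  simp only [pvTriples, List.foldl_cons, List.foldl_nil, List.map_cons, List.map_nil,
    List.sum_cons, List.sum_nil]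
  rw [count_eq_cnt '0' '1' '2' (by decide) (by decide),
      count_eq_cnt '1' '2' '3' (by decide) (by decide),
      count_eq_cnt '2' '3' '4' (by decide) (by decide),
      count_eq_cnt '3' '4' '5' (by decide) (by decide),
      count_eq_cnt '4' '5' '6' (by decide) (by decide),
      count_eq_cnt '5' '6' '7' (by decide) (by decide),
      count_eq_cnt '6' '7' '8' (by decide) (by decide),
      count_eq_cnt '7' '8' '9' (by decide) (by decide)]
  push_cast
  ring

-- ===== VERDICT (by name: the statement is the Claim_ definition above) =====
theorem sequentialNumbers_spec : Claim_equal_sequentialNumbers := by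
  intro password _
  unfold Spec_sequentialNumbers
  rw [portA_eq, portB_eq]
  ring
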